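-- pv_equiv track=rewrite | github.com/Austin-Rager/CS-2100 | for-loops.py | combinations_repetition
-- ===== SOURCE A (Python) =====
-- def combinations_repetition(items, n):
--     if n == 0:
--         return [[]]
--     result = []
--     for i in range(len(items)):
--         for c in combinations_repetition(items[i:], n-1):
--             result.append([items[i]] + c)
--     return result
-- ===== SOURCE B (Python) =====
-- def combinations_repetition(items, n):
--     if n < 0:
--         return []
--     states = [([], items)]
--     for _ in range(n):
--         new = []
--         for comb, suf in states:
--             for j in range(len(suf)):
--                 new.append((comb + [suf[j]], suf[j:]))
--         states = new
--     return [comb for comb, _ in states]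
-- ===== Notes on version B (the rewrite author's own statement) =====
-- stated objective: alternative
-- what changed: Replaces A's depth-first recursion (prepend items[i] to each recursive result on the suffix) with an iterative breadth-first odometer that extends a list of (prefix, suffix) states n times and reads off the prefixes.
import Mathlib
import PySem

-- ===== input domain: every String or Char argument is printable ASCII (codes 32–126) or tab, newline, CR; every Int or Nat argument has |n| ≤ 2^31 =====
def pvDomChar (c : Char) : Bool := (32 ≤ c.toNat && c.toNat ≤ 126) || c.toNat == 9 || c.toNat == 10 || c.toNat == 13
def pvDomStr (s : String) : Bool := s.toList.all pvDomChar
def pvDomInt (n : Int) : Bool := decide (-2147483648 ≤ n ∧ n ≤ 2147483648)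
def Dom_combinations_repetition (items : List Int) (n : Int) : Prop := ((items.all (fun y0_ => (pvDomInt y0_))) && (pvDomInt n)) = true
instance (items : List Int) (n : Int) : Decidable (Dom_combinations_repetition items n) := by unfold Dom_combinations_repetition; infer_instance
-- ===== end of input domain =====

-- B replaces A's depth-first recursion by an iterative breadth-first level extension
-- ((prefix, suffix) states extended n times); objective: alternative decomposition, same cost.

-- ===== PORT A =====
-- fuel makes the recursion total; for n ≥ 0 the fuel n.toNat + 1 is never exhausted,
-- so the computation is exactly A's (A diverges for n < 0 with nonempty items: outside Pre_).
def combRec (fuel : Nat) (items : List Int) (n : Int) : List (List Int) :=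
  match fuel with
  | 0 => []
  | f + 1 =>
    if n = 0 then [[]]
    else
      (List.range items.length).foldl
        (fun result (i : Nat) =>
          (combRec f (PySem.List.slice items (some (i : Int)) none) (n - 1)).foldl
            (fun res c => res ++ [PySem.List.pyGetD items (i : Int) 0 :: c]) result)
        []

def combinations_repetition (items : List Int) (n : Int) : List (List Int) :=
  combRec (n.toNat + 1) items n

-- ===== PORT B =====
-- one level of the odometer: extend every (prefix, suffix) state by each element of its suffix
def stepAlt (states : List (List Int × List Int)) : List (List Int × List Int) :=
  states.foldl
    (fun acc p =>
      (List.range p.2.length).foldl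
        (fun acc2 (j : Nat) =>
          acc2 ++ [(p.1 ++ [PySem.List.pyGetD p.2 (j : Int) 0],
                    PySem.List.slice p.2 (some (j : Int)) none)])
        acc)
    []

def combinations_repetition_alt (items : List Int) (n : Int) : List (List Int) :=
  if n < 0 then []
  else (stepAlt^[n.toNat] [(([] : List Int), items)]).map Prod.fst

-- ===== PRECONDITION & SPEC =====
-- Pre_ excludes n < 0 with nonempty items: there A recurses forever (RecursionError).
def Pre_combinations_repetition (items : List Int) (n : Int) : Prop := 0 ≤ n ∨ items = []
instance (items : List Int) (n : Int) : Decidable (Pre_combinations_repetition items n) := by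
  unfold Pre_combinations_repetition; infer_instance

def pvWitness_combinations_repetition : List Int × Int := ([1, 2], 2)

def Spec_combinations_repetition (items : List Int) (n : Int) (out : List (List Int)) : Prop :=
  out = combinations_repetition_alt items n
instance (items : List Int) (n : Int) (out : List (List Int)) :
    Decidable (Spec_combinations_repetition items n out) := by
  unfold Spec_combinations_repetition; infer_instance

-- ===== CLAIM (what is proved, stated in full; the proofs are below) =====
def Claim_equal_combinations_repetition : Prop :=
  ∀ (items : List Int) (n : Int), Dom_combinations_repetition items n →
    Pre_combinations_repetition items n →
    Spec_combinations_repetition items n (combinations_repetition items n)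

-- ===== LEMMAS AND PROOFS =====

-- common mathematical characterisation both ports are reduced to
def combsSpec : List Int → Nat → List (List Int)
  | _, 0 => [[]]
  | suf, k + 1 =>
      (List.range suf.length).flatMap
        (fun i => (combsSpec (suf.drop i) k).map (fun c => suf.getD i 0 :: c))

theorem combRec_go (l : List Nat) (acc : List (List Int)) (f : Nat) (suf : List Int) (n : Int) :
    l.foldl
      (fun result (i : Nat) =>
        (combRec f (PySem.List.slice suf (some (i : Int)) none) n).foldl
          (fun res c => res ++ [PySem.List.pyGetD suf (i : Int) 0 :: c]) result)
      acc
    = acc ++ l.flatMap (fun i => (combRec f (suf.drop i) n).map (fun c => suf.getD i 0 :: c)) := by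
  induction l generalizing acc with
  | nil => simp
  | cons i t ih =>
      rw [List.foldl_cons, PySem.List.foldl_append_singleton_eq_map, ih]
      simp [PySem.List.slice_from_natCast, List.append_assoc]

theorem combRec_eq_spec : ∀ (k f : Nat) (suf : List Int), k < f →
    combRec f suf (k : Int) = combsSpec suf k := by
  intro k
  induction k with
  | zero =>
      intro f suf hf
      cases f with
      | zero => omega
      | succ f => simp [combRec, combsSpec]
  | succ k ih =>
      intro f suf hf
      cases f with
      | zero => omega
      | succ f =>
          have hne : ((k : Int) + 1) ≠ 0 := by omega
          have hsub : ((k : Int) + 1) - 1 = (k : Int) := by ring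
          simp only [combRec, Nat.cast_succ, hne, if_false, combRec_go, List.nil_append, hsub]
          rw [combsSpec]
          congr 1
          funext i
          rw [ih f _ (by omega)]

theorem stepAlt_go (l : List (List Int × List Int)) (acc : List (List Int × List Int)) :
    l.foldl
      (fun acc p =>
        (List.range p.2.length).foldl
          (fun acc2 (j : Nat) =>
            acc2 ++ [(p.1 ++ [PySem.List.pyGetD p.2 (j : Int) 0],
                      PySem.List.slice p.2 (some (j : Int)) none)])
          acc)
      acc
    = acc ++ l.flatMap
        (fun p => (List.range p.2.length).map (fun j => (p.1 ++ [p.2.getD j 0], p.2.drop j))) := by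
  induction l generalizing acc with
  | nil => simp
  | cons p t ih =>
      rw [List.foldl_cons, PySem.List.foldl_append_singleton_eq_map, ih]
      simp [PySem.List.slice_from_natCast, List.append_assoc]

theorem stepAlt_flatMap (l : List (List Int × List Int)) :
    stepAlt l = l.flatMap
      (fun p => (List.range p.2.length).map (fun j => (p.1 ++ [p.2.getD j 0], p.2.drop j))) := by
  unfold stepAlt
  rw [stepAlt_go]
  simp

theorem stepAlt_iter_nil (k : Nat) : stepAlt^[k] ([] : List (List Int × List Int)) = [] := by
  induction k with
  | zero => rfl
  | succ k ih => rw [Function.iterate_succ_apply, stepAlt_flatMap]; simpa using ih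

theorem stepAlt_iter_append (k : Nat) (a b : List (List Int × List Int)) :
    stepAlt^[k] (a ++ b) = stepAlt^[k] a ++ stepAlt^[k] b := by
  induction k generalizing a b with
  | zero => simp
  | succ k ih =>
      rw [Function.iterate_succ_apply, Function.iterate_succ_apply,
        Function.iterate_succ_apply, stepAlt_flatMap, List.flatMap_append,
        ← stepAlt_flatMap, ← stepAlt_flatMap, ih]

theorem stepAlt_iter_split (k : Nat) (l : List (List Int × List Int)) :
    (stepAlt^[k] l).map Prod.fst = l.flatMap (fun p => (stepAlt^[k] [p]).map Prod.fst) := by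
  induction l with
  | nil => simp [stepAlt_iter_nil]
  | cons p t ih =>
      have : p :: t = [p] ++ t := rfl
      rw [this, stepAlt_iter_append, List.map_append, ih]
      simp

theorem alt_iter_eq_spec : ∀ (k : Nat) (c suf : List Int),
    (stepAlt^[k] [(c, suf)]).map Prod.fst = (combsSpec suf k).map (fun l => c ++ l) := by
  intro k
  induction k with
  | zero => intro c suf; simp [combsSpec]
  | succ k ih =>
      intro c suf
      rw [Function.iterate_succ_apply, stepAlt_flatMap]
      simp only [List.flatMap_cons, List.flatMap_nil, List.append_nil]
      rw [stepAlt_iter_split]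
      simp only [List.flatMap_map]
      rw [combsSpec]
      simp only [List.map_flatMap, List.map_map]
      congr 1
      funext i
      rw [ih]
      simp [Function.comp, List.append_assoc]

-- ===== VERDICT (by name: the statement is the Claim_ definition above) =====
theorem combinations_repetition_spec : Claim_equal_combinations_repetition := by
  intro items n _ hPre
  unfold Spec_combinations_repetition combinations_repetition combinations_repetition_alt
  by_cases h0 : 0 ≤ n
  · have hn : ((n.toNat : Nat) : Int) = n := Int.toNat_of_nonneg h0
    rw [if_neg (by omega)]
    calc combRec (n.toNat + 1) items n
        = combRec (n.toNat + 1) items ((n.toNat : Nat) : Int) := by rw [hn]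
      _ = combsSpec items n.toNat := combRec_eq_spec _ _ _ (by omega)
      _ = (stepAlt^[n.toNat] [(([] : List Int), items)]).map Prod.fst := by
          rw [alt_iter_eq_spec]; simp
  · have hitems : items = [] := hPre.resolve_left h0
    subst hitems
    have h1 : n.toNat = 0 := by omega
    rw [if_pos (by omega : n < 0), h1]
    simp [combRec, show n ≠ 0 by omega]
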